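-- pv_equiv track=rewrite | github.com/bombermon/CryptoBOt | crypto.py | delete_brackets
-- ===== SOURCE A (Python) =====
-- def delete_brackets(elem):
--     ans = ''
--     state = False
--     for i in elem:
--         if i == '<':
--             state = False
--         elif i == '>':
--             state = True
--         if state and (i != '<' and i != '>'):
--             ans += i
--     ans = ans.strip()
--     ans = ans.replace(',', '.')
--     return ans
-- ===== SOURCE B (Python) =====
-- def delete_brackets(elem):
--     kept = ''.join(p.split('<')[0] for p in elem.split('>')[1:])
--     return kept.strip().replace(',', '.')
-- ===== Notes on version B (the rewrite author's own statement) =====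
-- stated objective: idiomatic
-- what changed: Replaces the per-character boolean state machine by splitting on '>' and truncating each following segment at its first '<', then one strip/replace pass.
import Mathlib
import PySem

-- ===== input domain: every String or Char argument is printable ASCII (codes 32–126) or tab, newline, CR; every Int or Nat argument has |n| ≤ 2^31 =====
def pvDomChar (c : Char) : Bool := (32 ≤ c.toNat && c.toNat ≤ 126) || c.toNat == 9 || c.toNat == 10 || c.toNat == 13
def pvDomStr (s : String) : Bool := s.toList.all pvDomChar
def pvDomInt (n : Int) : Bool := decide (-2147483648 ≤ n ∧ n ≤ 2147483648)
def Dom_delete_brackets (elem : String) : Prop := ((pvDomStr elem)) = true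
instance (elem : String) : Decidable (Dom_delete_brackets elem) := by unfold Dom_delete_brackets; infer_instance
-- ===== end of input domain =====

-- B replaces A's per-character boolean state machine by split('>')/split('<') segment extraction (idiomatic; same cost).

-- ===== PORT A =====
-- A's loop state: (ans, state); state is updated first, then the kept-character test runs (as in the Python).
def pvStepA (p : List Char × Bool) (c : Char) : List Char × Bool :=
  let state := if c = '<' then false else if c = '>' then true else p.2
  (if state && (c != '<' && c != '>') then p.1 ++ [c] else p.1, state)

def delete_brackets (elem : String) : String :=
  let r := elem.toList.foldl pvStepA ([], false)
  let ans := PySem.Chars.strip r.1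
  let ans := PySem.Chars.replace ans [','] ['.']
  String.ofList ans

-- ===== PORT B =====
def delete_brackets_alt (elem : String) : String :=
  let kept := PySem.Chars.join []
    ((PySem.List.slice (PySem.Chars.splitOn elem.toList ['>']) (some 1) none).map
      (fun p => PySem.List.pyGetD (PySem.Chars.splitOn p ['<']) 0 []))
  String.ofList (PySem.Chars.replace (PySem.Chars.strip kept) [','] ['.'])

-- ===== PRECONDITION & SPEC =====
def Spec_delete_brackets (elem : String) (out : String) : Prop := out = delete_brackets_alt elem
instance (elem : String) (out : String) : Decidable (Spec_delete_brackets elem out) := by unfold Spec_delete_brackets; infer_instance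

-- ===== CLAIM (what is proved, stated in full; the proofs are below) =====
def Claim_equal_delete_brackets : Prop := ∀ (elem : String), Dom_delete_brackets elem → Spec_delete_brackets elem (delete_brackets elem)

-- ===== LEMMAS AND PROOFS =====

-- spec version of splitting on a single character
def pvSplitC (c : Char) : List Char → List (List Char)
  | [] => [[]]
  | x :: xs => if x = c then [] :: pvSplitC c xs else (pvSplitC c xs).modifyHead (x :: ·)

theorem pvSplitC_ne_nil (c : Char) (l : List Char) : pvSplitC c l ≠ [] := by
  cases l with
  | nil => simp [pvSplitC]
  | cons x xs =>
    simp only [pvSplitC]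
    split
    · simp
    · cases h : pvSplitC c xs with
      | nil => exact absurd h (pvSplitC_ne_nil c xs)
      | cons a as => simp

theorem pvSplitOn_go_single (c : Char) (l : List Char) :
    ∀ (fuel : Nat) (cur : List Char) (acc : List (List Char)), l.length < fuel →
    PySem.Chars.splitOn.go [c] fuel l cur acc =
      acc.reverse ++ (pvSplitC c l).modifyHead (cur.reverse ++ ·) := by
  induction l with
  | nil =>
    intro fuel cur acc h
    match fuel with
    | fuel + 1 => simp [PySem.Chars.splitOn.go, pvSplitC]
  | cons x xs ih =>
    intro fuel cur acc h
    match fuel with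
    | fuel + 1 =>
      simp only [PySem.Chars.splitOn.go]
      by_cases hx : x = c
      · subst hx
        simp only [List.isPrefixOf, beq_self_eq_true, Bool.true_and,
          if_pos, List.length_cons, List.length_nil, List.drop_succ_cons, List.drop_zero]
        rw [ih fuel [] (cur.reverse :: acc) (Nat.lt_of_succ_lt_succ h)]
        simp only [pvSplitC, List.modifyHead, List.reverse_cons, List.append_assoc,
          List.reverse_nil, List.nil_append, List.singleton_append]
        cases pvSplitC x xs <;> simp
      · rw [show List.isPrefixOf [c] (x :: xs) = false by simp [List.isPrefixOf]; exact fun hcx => hx hcx.symm]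
        simp only [Bool.false_eq_true, if_false]
        rw [ih fuel (x :: cur) acc (Nat.lt_of_succ_lt_succ h)]
        simp only [pvSplitC, if_neg hx]
        cases hs : pvSplitC c xs with
        | nil => exact absurd hs (pvSplitC_ne_nil c xs)
        | cons a as => simp

theorem pvSplitOn_single (c : Char) (l : List Char) :
    PySem.Chars.splitOn l [c] = pvSplitC c l := by
  rw [PySem.Chars.splitOn, pvSplitOn_go_single c l (l.length + 1) [] [] (Nat.lt_succ_self _)]
  cases h : pvSplitC c l with
  | nil => exact absurd h (pvSplitC_ne_nil c l)
  | cons a as => simp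

theorem pvSplitC_head (c : Char) (l : List Char) :
    (pvSplitC c l).headD [] = l.takeWhile (fun x => x ≠ c) := by
  induction l with
  | nil => simp [pvSplitC]
  | cons x xs ih =>
    simp only [pvSplitC]
    by_cases hx : x = c
    · simp [hx, List.takeWhile]
    · rw [if_neg hx]
      cases hs : pvSplitC c xs with
      | nil => exact absurd hs (pvSplitC_ne_nil c xs)
      | cons a as =>
        rw [hs] at ih
        simp only [List.headD] at ih
        simp [List.modifyHead, List.takeWhile, hx, ih]

-- spec version of A's kept characters
def pvKeepA (st : Bool) : List Char → List Char
  | [] => []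
  | x :: xs =>
    if x = '<' then pvKeepA false xs
    else if x = '>' then pvKeepA true xs
    else (if st then [x] else []) ++ pvKeepA st xs

theorem pvFoldA (l : List Char) : ∀ (ans : List Char) (st : Bool),
    (l.foldl pvStepA (ans, st)).1 = ans ++ pvKeepA st l := by
  induction l with
  | nil => intro ans st; simp [pvKeepA]
  | cons x xs ih =>
    intro ans st
    simp only [List.foldl_cons, pvStepA, pvKeepA]
    by_cases h1 : x = '<'
    · simp [h1, ih]
    · by_cases h2 : x = '>'
      · simp [h2, ih]
      · cases st <;> simp [h1, h2, ih]

def pvB (l : List Char) : List (List Char) :=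
  (pvSplitC '>' l).map (fun p => p.takeWhile (fun x => x ≠ '<'))

theorem pvKeep_eq_join (l : List Char) :
    pvKeepA true l = (pvB l).flatten ∧ pvKeepA false l = (pvB l).tail.flatten := by
  induction l with
  | nil => simp [pvKeepA, pvB, pvSplitC, List.takeWhile]
  | cons x xs ih =>
    obtain ⟨ihT, ihF⟩ := ih
    by_cases h2 : x = '>'
    · subst h2
      constructor <;> simp [pvKeepA, pvB, pvSplitC, ihT]
    · have hsplit : pvSplitC '>' (x :: xs) = (pvSplitC '>' xs).modifyHead (x :: ·) := by
        simp [pvSplitC, h2]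
      obtain ⟨a, as, hs⟩ : ∃ a as, pvSplitC '>' xs = a :: as := by
        cases h : pvSplitC '>' xs with
        | nil => exact absurd h (pvSplitC_ne_nil _ _)
        | cons a as => exact ⟨a, as, rfl⟩
      simp only [pvB, hs, List.map_cons] at ihT ihF
      by_cases h1 : x = '<'
      · subst h1
        constructor
        · simp only [pvKeepA, ihF]
          simp [pvB, hsplit, hs, List.takeWhile]
        · simp only [pvKeepA, ihF]
          simp [pvB, hsplit, hs]
      · constructor
        · simp only [pvKeepA, if_neg h1, if_neg h2, if_pos trivial]
          simp [pvB, hsplit, hs, List.takeWhile, h1, ihT]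
        · simp only [pvKeepA, if_neg h1, if_neg h2]
          simp [pvB, hsplit, hs, ihF]

theorem pvIntercalate_nil {α : Type} (L : List (List α)) :
    List.intercalate ([] : List α) L = L.flatten := by
  induction L with
  | nil => simp [List.intercalate]
  | cons a t ih => cases t <;> simp_all [List.intercalate, List.intersperse]

theorem pvKept_eq (l : List Char) :
    (l.foldl pvStepA ([], false)).1 =
      PySem.Chars.join []
        ((PySem.List.slice (PySem.Chars.splitOn l ['>']) (some 1) none).map
          (fun p => PySem.List.pyGetD (PySem.Chars.splitOn p ['<']) 0 [])) := by
  rw [pvFoldA, PySem.List.slice_from_one, pvSplitOn_single]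
  have hmap : ∀ p, PySem.List.pyGetD (PySem.Chars.splitOn p ['<']) 0 ([] : List Char) =
      p.takeWhile (fun x => x ≠ '<') := by
    intro p
    rw [pvSplitOn_single, ← pvSplitC_head]
    cases h : pvSplitC '<' p with
    | nil => exact absurd h (pvSplitC_ne_nil _ _)
    | cons a as => simp [PySem.List.pyGetD, PySem.List.pyGet?, PySem.List.pyIdx?]
  simp only [hmap]
  rw [(pvKeep_eq_join l).2]
  simp [PySem.Chars.join, pvIntercalate_nil, pvB, List.map_tail]

-- ===== VERDICT (by name: the statement is the Claim_ definition above) =====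
theorem delete_brackets_spec : Claim_equal_delete_brackets := by
  intro elem _
  simp only [Spec_delete_brackets, delete_brackets, delete_brackets_alt, pvKept_eq]
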